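-- pv_equiv track=rewrite | github.com/aschroedermd/ankimaxxing | backend/rewrite_engine.py | compute_distribution
-- ===== SOURCE A (Python) =====
-- from typing import Any, Optional
--
-- def compute_distribution(
--     variant_count: int,
--     override: Optional[dict[str, int]] = None,
-- ) -> list[str]:
--     """
--     Return an ordered list of style names for the requested variant count.
--
--     If override is provided, it should be {"conservative": N, "moderate": N, "aggressive": N}.
--     """
--     if override:
--         styles: list[str] = []
--         for style, count in override.items():
--             styles.extend([style] * count)
--         return styles[:variant_count]
--
--     if variant_count <= 0:
--         return []
--     if variant_count == 1:
--         return ["moderate"]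
--     if variant_count == 2:
--         return ["moderate", "aggressive"]
--
--     # 3+ variants: spread evenly across three styles
--     base, remainder = divmod(variant_count, 3)
--     styles = (
--         ["conservative"] * base
--         + ["moderate"] * base
--         + ["aggressive"] * base
--     )
--     # Distribute remainder: prefer aggressive, then moderate
--     extras = ["aggressive", "moderate", "conservative"]
--     for i in range(remainder):
--         styles.append(extras[i % 3])
--
--     return sorted(
--         styles,
--         key=lambda s: {"conservative": 0, "moderate": 1, "aggressive": 2}[s],
--     )
-- ===== SOURCE B (Python) =====
-- from typing import Any, Optional
--
--
-- def compute_distribution(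
--     variant_count: int,
--     override: Optional[dict[str, int]] = None,
-- ) -> list[str]:
--     if override:
--         styles: list[str] = []
--         for style, count in override.items():
--             styles.extend([style] * count)
--         return styles[:variant_count]
--
--     if variant_count <= 0:
--         return []
--     if variant_count == 1:
--         return ["moderate"]
--     if variant_count == 2:
--         return ["moderate", "aggressive"]
--
--     # 3+ variants: closed-form per-style counts (remainder 1 -> extra aggressive;
--     # remainder 2 -> extra aggressive and moderate), emitted already in order.
--     base, remainder = divmod(variant_count, 3)
--     return (
--         ["conservative"] * base
--         + ["moderate"] * (base + (1 if remainder == 2 else 0))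
--         + ["aggressive"] * (base + (1 if remainder >= 1 else 0))
--     )
-- ===== Notes on version B (the rewrite author's own statement) =====
-- stated objective: simpler
-- what changed: The 3+ branch computes the three per-style counts in closed form from divmod's remainder and emits the list directly in order, replacing A's build-equal-thirds, append-extras-loop, then key-based sort.
import Mathlib
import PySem

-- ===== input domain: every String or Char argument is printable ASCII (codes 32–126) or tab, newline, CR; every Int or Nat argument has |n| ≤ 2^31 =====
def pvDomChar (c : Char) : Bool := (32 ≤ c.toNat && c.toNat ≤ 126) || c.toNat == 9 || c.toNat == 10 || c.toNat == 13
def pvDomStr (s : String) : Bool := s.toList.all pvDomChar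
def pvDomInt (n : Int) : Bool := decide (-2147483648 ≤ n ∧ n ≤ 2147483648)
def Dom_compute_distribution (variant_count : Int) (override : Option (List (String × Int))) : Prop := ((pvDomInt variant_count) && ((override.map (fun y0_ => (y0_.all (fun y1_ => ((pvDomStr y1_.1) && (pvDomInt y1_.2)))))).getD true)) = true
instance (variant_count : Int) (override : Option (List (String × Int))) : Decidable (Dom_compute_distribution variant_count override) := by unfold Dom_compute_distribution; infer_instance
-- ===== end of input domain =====

-- B replaces A's build-thirds + append-extras-loop + key-sort in the 3+ branch by a
-- closed-form count per style emitted directly in order (simpler; same cost class).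

-- ===== PORT A =====
-- the key lookup {...}[s] can only raise KeyError for strings other than the three
-- style names, which never occur in `styles`, so `.getD 0` is exact here
def compute_distribution (variant_count : Int) (override : Option (List (String × Int))) : List String :=
  let d := PySem.Dict.ofList (override.getD [])
  if d.items.isEmpty = false then
    PySem.List.slice
      (d.items.foldl (fun styles p => styles ++ PySem.List.pyRepeat [p.1] p.2) [])
      none (some variant_count)
  else if variant_count ≤ 0 then []
  else if variant_count = 1 then ["moderate"]
  else if variant_count = 2 then ["moderate", "aggressive"]
  else
    let base := PySem.Int.floordiv variant_count 3
    let remainder := PySem.Int.mod variant_count 3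
    let styles := PySem.List.pyRepeat ["conservative"] base
      ++ PySem.List.pyRepeat ["moderate"] base
      ++ PySem.List.pyRepeat ["aggressive"] base
    let extras := ["aggressive", "moderate", "conservative"]
    let styles2 := (PySem.List.pyRange 0 remainder 1).foldl
      (fun acc i => acc ++ [(PySem.List.pyGet? extras (PySem.Int.mod i 3)).getD ""]) styles
    PySem.List.sorted styles2
      (fun s => ((PySem.Dict.ofList
        [("conservative", (0 : Int)), ("moderate", 1), ("aggressive", 2)]).get? s).getD 0) false

-- ===== PORT B =====
def compute_distribution_alt (variant_count : Int) (override : Option (List (String × Int))) : List String :=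
  let d := PySem.Dict.ofList (override.getD [])
  if d.items.isEmpty = false then
    PySem.List.slice
      (d.items.foldl (fun styles p => styles ++ PySem.List.pyRepeat [p.1] p.2) [])
      none (some variant_count)
  else if variant_count ≤ 0 then []
  else if variant_count = 1 then ["moderate"]
  else if variant_count = 2 then ["moderate", "aggressive"]
  else
    let base := PySem.Int.floordiv variant_count 3
    let remainder := PySem.Int.mod variant_count 3
    PySem.List.pyRepeat ["conservative"] base
      ++ PySem.List.pyRepeat ["moderate"] (base + (if remainder = 2 then 1 else 0))
      ++ PySem.List.pyRepeat ["aggressive"] (base + (if remainder ≥ 1 then 1 else 0))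

-- ===== PRECONDITION & SPEC =====
def Spec_compute_distribution (variant_count : Int) (override : Option (List (String × Int))) (out : List String) : Prop := out = compute_distribution_alt variant_count override
instance (variant_count : Int) (override : Option (List (String × Int))) (out : List String) : Decidable (Spec_compute_distribution variant_count override out) := by unfold Spec_compute_distribution; infer_instance

-- ===== CLAIM (what is proved, stated in full; the proofs are below) =====
def Claim_equal_compute_distribution : Prop := ∀ (variant_count : Int) (override : Option (List (String × Int))), Dom_compute_distribution variant_count override → Spec_compute_distribution variant_count override (compute_distribution variant_count override)

-- ===== LEMMAS AND PROOFS =====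

-- two lists that are permutations of each other, both sorted by key, with key
-- injective on the elements involved, are equal; hence sorted xs = ys
theorem sorted_eq_of_perm_of_pairwise_le_of_tie (key : String → Int)
    (xs ys : List String) (hperm : ys.Perm xs)
    (hpy : ys.Pairwise (fun a b => key a ≤ key b))
    (htie : ∀ a ∈ xs, ∀ b ∈ xs, key a = key b → a = b) :
    PySem.List.sorted xs key false = ys := by
  have hzp : (PySem.List.sorted xs key false).Perm xs := PySem.List.sorted_perm xs key false
  have hz : (PySem.List.sorted xs key false).Pairwise (fun a b => key a ≤ key b) :=
    PySem.List.sorted_pairwise xs key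
  refine List.Perm.eq_of_pairwise ?_ hz hpy (hzp.trans hperm.symm)
  intro a b ha hb hab hba
  exact htie a (hzp.mem_iff.mp ha) b (hperm.mem_iff.mp hb) (le_antisymm hab hba)

theorem sorted_CMA (key : String → Int)
    (h0 : key "conservative" = 0) (h1 : key "moderate" = 1) (h2 : key "aggressive" = 2)
    (n dm da : Nat) (E : List String)
    (hc : E.count "conservative" = 0) (hm : E.count "moderate" = dm)
    (ha : E.count "aggressive" = da)
    (hE : ∀ a ∈ E, a = "conservative" ∨ a = "moderate" ∨ a = "aggressive") :
    PySem.List.sorted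
      (List.replicate n "conservative" ++ List.replicate n "moderate"
        ++ List.replicate n "aggressive" ++ E) key false
    = List.replicate n "conservative" ++ List.replicate (n + dm) "moderate"
        ++ List.replicate (n + da) "aggressive" := by
  apply sorted_eq_of_perm_of_pairwise_le_of_tie
  · rw [List.perm_iff_count]
    intro s
    by_cases hsc : s = "conservative"
    · subst hsc
      simp only [List.count_append, List.count_replicate, hc]
      split_ifs <;> first | omega | simp_all
    · by_cases hsm : s = "moderate"
      · subst hsm
        simp only [List.count_append, List.count_replicate, hm]
        split_ifs <;> first | omega | simp_all
      · by_cases hsa : s = "aggressive"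
        · subst hsa
          simp only [List.count_append, List.count_replicate, ha]
          split_ifs <;> first | omega | simp_all
        · have hE0 : E.count s = 0 := by
            rw [List.count_eq_zero]
            intro hmem
            rcases hE s hmem with h | h | h <;> simp_all
          simp only [List.count_append, List.count_replicate, hE0]
          split_ifs <;> first | omega | simp_all
  · refine List.pairwise_append.2 ⟨List.pairwise_append.2 ⟨?_, ?_, ?_⟩, ?_, ?_⟩
    · exact List.pairwise_replicate.2 (Or.inr (by omega))
    · exact List.pairwise_replicate.2 (Or.inr (by omega))
    · intro a ha' b hb'
      obtain rfl := List.eq_of_mem_replicate ha'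
      obtain rfl := List.eq_of_mem_replicate hb'
      omega
    · exact List.pairwise_replicate.2 (Or.inr (by omega))
    · intro a ha' b hb'
      obtain rfl := List.eq_of_mem_replicate hb'
      rcases List.mem_append.1 ha' with h | h <;> obtain rfl := List.eq_of_mem_replicate h <;> omega
  · intro a hma b hmb hk
    have mem3 : ∀ x, x ∈ (List.replicate n "conservative" ++ List.replicate n "moderate"
        ++ List.replicate n "aggressive" ++ E) →
        x = "conservative" ∨ x = "moderate" ∨ x = "aggressive" := by
      intro x hx
      simp only [List.mem_append, List.mem_replicate] at hx
      rcases hx with ((⟨-, rfl⟩ | ⟨-, rfl⟩) | ⟨-, rfl⟩) | hx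
      · exact Or.inl rfl
      · exact Or.inr (Or.inl rfl)
      · exact Or.inr (Or.inr rfl)
      · exact hE x hx
    rcases mem3 a hma with rfl | rfl | rfl <;> rcases mem3 b hmb with rfl | rfl | rfl <;>
      first | rfl | omega

-- ===== VERDICT (by name: the statement is the Claim_ definition above) =====
theorem compute_distribution_spec : Claim_equal_compute_distribution := by
  intro vc ov _
  unfold Spec_compute_distribution compute_distribution compute_distribution_alt
  by_cases hne : (PySem.Dict.ofList (ov.getD [])).items.isEmpty = false
  · rw [if_pos hne, if_pos hne]
  · rw [if_neg hne, if_neg hne]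
    by_cases h0 : vc ≤ 0
    · rw [if_pos h0, if_pos h0]
    · rw [if_neg h0, if_neg h0]
      by_cases h1 : vc = 1
      · rw [if_pos h1, if_pos h1]
      · rw [if_neg h1, if_neg h1]
        by_cases h2 : vc = 2
        · rw [if_pos h2, if_pos h2]
        · rw [if_neg h2, if_neg h2]
          have hb3 : PySem.Int.floordiv vc 3 = vc / 3 :=
            PySem.Int.floordiv_eq_ediv_of_pos (by norm_num)
          have hr3 : PySem.Int.mod vc 3 = vc % 3 :=
            PySem.Int.mod_eq_emod_of_pos (by norm_num)
          have hbpos : 0 ≤ vc / 3 := by omega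
          have hq1 : (vc / 3 + 1).toNat = (vc / 3).toNat + 1 := by omega
          have hcase : vc % 3 = 0 ∨ vc % 3 = 1 ∨ vc % 3 = 2 := by omega
          rw [hb3, hr3]
          simp only [PySem.List.pyRepeat_singleton]
          obtain h | h | h := hcase <;> rw [h]
          · rw [show PySem.List.pyRange 0 0 1 = [] from by decide]
            simp only [List.foldl_nil]
            simpa using sorted_CMA _ (by decide) (by decide) (by decide)
              (vc / 3).toNat 0 0 [] (by decide) (by decide) (by decide) (by simp)
          · rw [show PySem.List.pyRange 0 1 1 = [0] from by decide]
            simp only [List.foldl_cons, List.foldl_nil]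
            rw [show (PySem.List.pyGet? ["aggressive", "moderate", "conservative"]
                  (PySem.Int.mod 0 3)).getD "" = "aggressive" from by decide]
            rw [if_neg (by norm_num), if_pos (by norm_num), add_zero, hq1]
            simpa using sorted_CMA _ (by decide) (by decide) (by decide)
              (vc / 3).toNat 0 1 ["aggressive"] (by decide) (by decide) (by decide) (by decide)
          · rw [show PySem.List.pyRange 0 2 1 = [0, 1] from by decide]
            simp only [List.foldl_cons, List.foldl_nil]
            rw [show (PySem.List.pyGet? ["aggressive", "moderate", "conservative"]
                  (PySem.Int.mod 0 3)).getD "" = "aggressive" from by decide]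
            rw [show (PySem.List.pyGet? ["aggressive", "moderate", "conservative"]
                  (PySem.Int.mod 1 3)).getD "" = "moderate" from by decide]
            norm_num [hq1]
            simpa [List.append_assoc] using sorted_CMA _ (by decide) (by decide) (by decide)
              (vc / 3).toNat 1 1 ["aggressive", "moderate"] (by decide) (by decide) (by decide)
              (by decide)
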